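-- pv_equiv track=rewrite | github.com/ym1100/openflow | backend/flowy_deepagents/content_writer.py | _summarize_operation_risks
-- ===== SOURCE A (Python) =====
-- from typing import Any, Dict, List, Literal, Optional, Set, Tuple, Union, cast
--
-- def _operation_risk_tier(op: Dict[str, Any]) -> str:
--     op_type = str(op.get("type") or "")
--     if op_type in {"removeNode", "removeEdge", "deleteGroup", "clearCanvas"}:
--         return "destructive"
--     if op_type in {"updateNode", "moveNode", "updateGroup", "setNodeGroup"}:
--         return "caution"
--     return "safe"
--
-- def _summarize_operation_risks(operations: Any) -> Dict[str, int]: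
--     summary = {"safe": 0, "caution": 0, "destructive": 0}
--     if not isinstance(operations, list):
--         return summary
--     for op in operations:
--         if not isinstance(op, dict):
--             continue
--         tier = _operation_risk_tier(op)
--         if tier in summary:
--             summary[tier] += 1
--     return summary
-- ===== SOURCE B (Python) =====
-- def _summarize_operation_risks(operations):
--     summary = {"safe": 0, "caution": 0, "destructive": 0}
--     if not isinstance(operations, list):
--         return summary
--     counts = {}
--     total = 0
--     for op in operations:
--         if not isinstance(op, dict):
--             continue
--         t = str(op.get("type") or "")
--         counts[t] = counts.get(t, 0) + 1
--         total += 1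
--     destructive = sum(counts.get(k, 0) for k in ("removeNode", "removeEdge", "deleteGroup", "clearCanvas"))
--     caution = sum(counts.get(k, 0) for k in ("updateNode", "moveNode", "updateGroup", "setNodeGroup"))
--     return {"safe": total - destructive - caution, "caution": caution, "destructive": destructive}
-- ===== Notes on version B (the rewrite author's own statement) =====
-- stated objective: alternative
-- what changed: Replaces A's per-operation tier classification and dict-increment loop with a count-then-aggregate pass: one pass builds a table of normalized type strings, then destructive/caution are sums over the fixed key sets and safe is total minus the others.
import Mathlib
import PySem

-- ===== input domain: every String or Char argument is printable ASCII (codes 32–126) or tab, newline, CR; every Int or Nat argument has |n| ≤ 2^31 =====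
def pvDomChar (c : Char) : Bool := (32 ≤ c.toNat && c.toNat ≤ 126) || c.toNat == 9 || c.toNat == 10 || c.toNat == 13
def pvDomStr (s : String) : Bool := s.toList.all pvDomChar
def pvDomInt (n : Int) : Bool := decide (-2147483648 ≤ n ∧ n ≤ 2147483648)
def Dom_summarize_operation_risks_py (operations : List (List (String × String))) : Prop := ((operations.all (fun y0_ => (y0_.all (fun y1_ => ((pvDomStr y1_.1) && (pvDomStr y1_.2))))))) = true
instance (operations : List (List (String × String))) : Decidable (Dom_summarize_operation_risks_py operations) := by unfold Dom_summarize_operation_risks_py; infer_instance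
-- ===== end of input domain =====

-- B replaces A's per-operation tier dict-increment loop by count-then-aggregate (alternative decomposition, same cost).


-- ===== PORT A =====
-- _operation_risk_tier: op.get("type") or "" is getD "type" "" (first-match lookup); set-literal membership tests.
def pvTierA (op : List (String × String)) : String :=
  if (PySem.Dict.mk op).getD "type" "" ∈ ["removeNode", "removeEdge", "deleteGroup", "clearCanvas"] then "destructive"
  else if (PySem.Dict.mk op).getD "type" "" ∈ ["updateNode", "moveNode", "updateGroup", "setNodeGroup"] then "caution"
  else "safe"

-- the isinstance guards are vacuous at this type (operations is a list of dicts)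
def summarize_operation_risks_py (operations : List (List (String × String))) : List (String × Int) :=
  let summary : PySem.Dict String Int := PySem.Dict.mk [("safe", 0), ("caution", 0), ("destructive", 0)]
  (operations.foldl (fun s op =>
    let tier := pvTierA op
    if s.contains tier then s.modify tier 0 (· + 1) else s) summary).items

-- ===== PORT B =====
def summarize_operation_risks_py_alt (operations : List (List (String × String))) : List (String × Int) :=
  let counts := operations.foldl (fun c op =>
      let t := (PySem.Dict.mk op).getD "type" ""
      c.insert t (c.getD t 0 + 1)) (PySem.Dict.empty : PySem.Dict String Int)
  let total : Int := operations.length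
  let destructive := (["removeNode", "removeEdge", "deleteGroup", "clearCanvas"].map (fun k => counts.getD k 0)).sum
  let caution := (["updateNode", "moveNode", "updateGroup", "setNodeGroup"].map (fun k => counts.getD k 0)).sum
  [("safe", total - destructive - caution), ("caution", caution), ("destructive", destructive)]

-- ===== PRECONDITION & SPEC =====
def Spec_summarize_operation_risks_py (operations : List (List (String × String))) (out : List (String × Int)) : Prop := out = summarize_operation_risks_py_alt operations
instance (operations : List (List (String × String))) (out : List (String × Int)) : Decidable (Spec_summarize_operation_risks_py operations out) := by unfold Spec_summarize_operation_risks_py; infer_instance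

-- ===== CLAIM (what is proved, stated in full; the proofs are below) =====
def Claim_equal_summarize_operation_risks_py : Prop := ∀ (operations : List (List (String × String))), Dom_summarize_operation_risks_py operations → Spec_summarize_operation_risks_py operations (summarize_operation_risks_py operations)

-- ===== LEMMAS AND PROOFS =====

-- type string of an operation (shared value both ports compute)
def pvTyp (op : List (String × String)) : String := (PySem.Dict.mk op).getD "type" ""

lemma pvTierA_cases (op : List (String × String)) :
    pvTierA op = "destructive" ∨ pvTierA op = "caution" ∨ pvTierA op = "safe" := by
  unfold pvTierA
  split_ifs <;> simp

def pvCntS (ops : List (List (String × String))) : Int := (ops.countP (fun op => pvTierA op == "safe") : Int)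
def pvCntC (ops : List (List (String × String))) : Int := (ops.countP (fun op => pvTierA op == "caution") : Int)
def pvCntD (ops : List (List (String × String))) : Int := (ops.countP (fun op => pvTierA op == "destructive") : Int)

lemma pvA_loop (ops : List (List (String × String))) (a b c : Int) :
    ops.foldl (fun s op =>
      let tier := pvTierA op
      if s.contains tier then s.modify tier 0 (· + 1) else s)
      (PySem.Dict.mk [("safe", a), ("caution", b), ("destructive", c)]) =
    PySem.Dict.mk [("safe", a + pvCntS ops), ("caution", b + pvCntC ops), ("destructive", c + pvCntD ops)] := by
  induction ops generalizing a b c with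
  | nil => simp [pvCntS, pvCntC, pvCntD]
  | cons x xs ih =>
    simp only [List.foldl_cons]
    by_cases h1 : pvTierA x = "destructive"
    · rw [show (let tier := pvTierA x;
          if (PySem.Dict.mk [("safe", a), ("caution", b), ("destructive", c)]).contains tier then
            (PySem.Dict.mk [("safe", a), ("caution", b), ("destructive", c)]).modify tier 0 (· + 1)
          else (PySem.Dict.mk [("safe", a), ("caution", b), ("destructive", c)])) =
          PySem.Dict.mk [("safe", a), ("caution", b), ("destructive", c + 1)] by
        simp [h1, PySem.Dict.modify, PySem.Dict.insert, PySem.Dict.getD, PySem.Dict.get?, PySem.Dict.contains]]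
      rw [ih]
      simp [pvCntS, pvCntC, pvCntD, List.countP_cons, h1]
      omega
    · by_cases h2 : pvTierA x = "caution"
      · rw [show (let tier := pvTierA x;
            if (PySem.Dict.mk [("safe", a), ("caution", b), ("destructive", c)]).contains tier then
              (PySem.Dict.mk [("safe", a), ("caution", b), ("destructive", c)]).modify tier 0 (· + 1)
            else (PySem.Dict.mk [("safe", a), ("caution", b), ("destructive", c)])) =
            PySem.Dict.mk [("safe", a), ("caution", b + 1), ("destructive", c)] by
          simp only [h2]; simp [PySem.Dict.modify, PySem.Dict.insert, PySem.Dict.getD, PySem.Dict.get?, PySem.Dict.contains]]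
        rw [ih]
        simp [pvCntS, pvCntC, pvCntD, List.countP_cons, h1, h2]
        omega
      · have h3 : pvTierA x = "safe" := by
          rcases pvTierA_cases x with h | h | h <;> simp_all
        rw [show (let tier := pvTierA x;
            if (PySem.Dict.mk [("safe", a), ("caution", b), ("destructive", c)]).contains tier then
              (PySem.Dict.mk [("safe", a), ("caution", b), ("destructive", c)]).modify tier 0 (· + 1)
            else (PySem.Dict.mk [("safe", a), ("caution", b), ("destructive", c)])) =
            PySem.Dict.mk [("safe", a + 1), ("caution", b), ("destructive", c)] by
          simp only [h3]; simp [PySem.Dict.modify, PySem.Dict.insert, PySem.Dict.getD, PySem.Dict.get?, PySem.Dict.contains]]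
        rw [ih]
        simp [pvCntS, pvCntC, pvCntD, List.countP_cons, h1, h2, h3]
        omega

-- tier counts expressed through type-string counts (the aggregation B performs)
lemma pv_tier_counts (ops : List (List (String × String))) :
    pvCntD ops = ((ops.map pvTyp).count "removeNode" + (ops.map pvTyp).count "removeEdge"
                + (ops.map pvTyp).count "deleteGroup" + (ops.map pvTyp).count "clearCanvas" : Int)
  ∧ pvCntC ops = ((ops.map pvTyp).count "updateNode" + (ops.map pvTyp).count "moveNode"
                + (ops.map pvTyp).count "updateGroup" + (ops.map pvTyp).count "setNodeGroup" : Int)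
  ∧ pvCntS ops + pvCntC ops + pvCntD ops = (ops.length : Int) := by
  induction ops with
  | nil => simp [pvCntS, pvCntC, pvCntD]
  | cons x xs ih =>
    obtain ⟨ihD, ihC, ihL⟩ := ih
    simp only [pvCntS, pvCntC, pvCntD, List.countP_cons, List.map_cons, List.count_cons,
      List.length_cons] at *
    have htier : pvTierA x =
        (if pvTyp x ∈ ["removeNode", "removeEdge", "deleteGroup", "clearCanvas"] then "destructive"
         else if pvTyp x ∈ ["updateNode", "moveNode", "updateGroup", "setNodeGroup"] then "caution"
         else "safe") := rfl
    by_cases h1 : pvTyp x ∈ ["removeNode", "removeEdge", "deleteGroup", "clearCanvas"]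
    · have ht : pvTierA x = "destructive" := by rw [htier]; simp [h1]
      simp only [List.mem_cons, List.mem_singleton, List.not_mem_nil, or_false] at h1
      refine ⟨?_, ?_, ?_⟩ <;>
        · rcases h1 with h | h | h | h <;>
            simp [ht, h, ihD, ihC, ihL] <;> push_cast <;> omega
    · by_cases h2 : pvTyp x ∈ ["updateNode", "moveNode", "updateGroup", "setNodeGroup"]
      · have ht : pvTierA x = "caution" := by rw [htier]; simp [h1, h2]
        simp only [List.mem_cons, List.mem_singleton, List.not_mem_nil, or_false] at h1 h2
        push_neg at h1
        refine ⟨?_, ?_, ?_⟩ <;>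
          · rcases h2 with h | h | h | h <;>
              simp [ht, h, h1.1, h1.2.1, h1.2.2.1, h1.2.2.2, ihD, ihC, ihL] <;> push_cast <;> omega
      · have ht : pvTierA x = "safe" := by rw [htier]; simp [h1, h2]
        simp only [List.mem_cons, List.mem_singleton, List.not_mem_nil, or_false] at h1 h2
        push_neg at h1 h2
        refine ⟨?_, ?_, ?_⟩ <;>
          simp [ht, h1.1, h1.2.1, h1.2.2.1, h1.2.2.2, h2.1, h2.2.1, h2.2.2.1, h2.2.2.2,
            ihD, ihC, ihL] <;> push_cast <;> omega

lemma pvB_counts (ops : List (List (String × String))) (k : String) :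
    (ops.foldl (fun c op =>
        let t := (PySem.Dict.mk op).getD "type" ""
        c.insert t (c.getD t 0 + 1)) (PySem.Dict.empty : PySem.Dict String Int)).getD k 0 =
    ((ops.map pvTyp).count k : Int) := by
  have h : ops.foldl (fun c op =>
        let t := (PySem.Dict.mk op).getD "type" ""
        c.insert t (c.getD t 0 + 1)) (PySem.Dict.empty : PySem.Dict String Int) =
      (ops.map pvTyp).foldl (fun c t => c.insert t (c.getD t 0 + 1))
        (PySem.Dict.empty : PySem.Dict String Int) := by
    rw [List.foldl_map]
    rfl
  rw [h, PySem.Dict.getD_foldl_insert_add_one]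
  simp

-- ===== VERDICT (by name: the statement is the Claim_ definition above) =====
theorem summarize_operation_risks_py_spec : Claim_equal_summarize_operation_risks_py := by
  intro ops _
  unfold Spec_summarize_operation_risks_py
  unfold summarize_operation_risks_py summarize_operation_risks_py_alt
  simp only []
  rw [pvA_loop]
  obtain ⟨hD, hC, hL⟩ := pv_tier_counts ops
  simp only [List.map_cons, List.map_nil, List.sum_cons, List.sum_nil, pvB_counts,
    PySem.Dict.items]
  simp only [List.cons.injEq, Prod.mk.injEq, List.nil_eq, and_true, true_and]
  refine ⟨by omega, by omega, by omega⟩
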